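-- pv_equiv track=rewrite | github.com/SteveJSmith1/morsiPY | MorseAudio.py | getDotEquivs
-- ===== SOURCE A (Python) =====
-- def getDotEquivs(morse_string):
--     morse_string += ' '
--     char_pairs = [(morse_string[i] + morse_string[i + 1]) for i in range(len(morse_string)-1)]
--
--     rules = { '--' : 4, '-.' : 4, '..' : 2,
--              '.-' : 2, '- ' : 6, '. ' : 4, ' /' : 5
--              }
--     pair_dotequivs = [rules.get(pair) for pair in char_pairs if pair in rules]
--     return sum(pair_dotequivs)
-- ===== SOURCE B (Python) =====
-- def getDotEquivs(morse_string):
--     s = morse_string + ' '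
--     counts = {}
--     for a, b in zip(s, s[1:]):
--         pair = a + b
--         counts[pair] = counts.get(pair, 0) + 1
--     rules = { '--' : 4, '-.' : 4, '..' : 2,
--              '.-' : 2, '- ' : 6, '. ' : 4, ' /' : 5
--              }
--     return sum(v * counts.get(k, 0) for k, v in rules.items())
-- ===== Notes on version B (the rewrite author's own statement) =====
-- stated objective: alternative
-- what changed: B counts all adjacent bigrams into a dict in one zip pass and then sums value * count over the fixed 7-entry rule table, instead of building the pair list and looking each pair up in the rules dict.
import Mathlib
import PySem

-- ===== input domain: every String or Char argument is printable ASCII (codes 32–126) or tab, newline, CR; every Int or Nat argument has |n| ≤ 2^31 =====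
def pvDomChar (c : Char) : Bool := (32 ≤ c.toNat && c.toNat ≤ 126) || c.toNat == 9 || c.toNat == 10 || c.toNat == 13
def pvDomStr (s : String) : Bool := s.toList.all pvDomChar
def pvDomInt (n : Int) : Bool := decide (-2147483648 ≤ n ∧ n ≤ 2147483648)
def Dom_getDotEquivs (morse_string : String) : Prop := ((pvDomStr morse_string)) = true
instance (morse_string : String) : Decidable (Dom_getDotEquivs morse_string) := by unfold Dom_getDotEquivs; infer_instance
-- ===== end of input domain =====

-- B builds a bigram-count dict in one zip pass and sums value * count over the 7 rule entries,
-- instead of A's pair list filtered/looked-up against the rules dict (alternative decomposition, same cost).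

-- the shared literal rules table { '--':4, '-.':4, '..':2, '.-':2, '- ':6, '. ':4, ' /':5 }
def pvRules : List (String × Int) :=
  [("--", 4), ("-.", 4), ("..", 2), (".-", 2), ("- ", 6), (". ", 4), (" /", 5)]

-- ===== PORT A =====
def getDotEquivs (morse_string : String) : Int :=
  let cs : List Char := morse_string.toList ++ [' ']   -- morse_string += ' '
  let char_pairs : List String :=
    (PySem.List.pyRange 0 ((cs.length : Int) - 1) 1).map
      (fun i => String.ofList [PySem.List.pyGetD cs i ' ', PySem.List.pyGetD cs (i + 1) ' '])
  let rules : PySem.Dict String Int := PySem.Dict.ofList pvRules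
  -- [rules.get(pair) for pair in char_pairs if pair in rules]: every kept pair is a key, so get = getD
  let pair_dotequivs : List Int :=
    (char_pairs.filter (fun p => rules.contains p)).map (fun p => rules.getD p 0)
  pair_dotequivs.sum

-- ===== PORT B =====
def getDotEquivs_alt (morse_string : String) : Int :=
  let cs : List Char := morse_string.toList ++ [' ']   -- s = morse_string + ' '
  -- for a, b in zip(s, s[1:]): counts[pair] = counts.get(pair, 0) + 1
  let counts : PySem.Dict String Int :=
    (cs.zip (cs.drop 1)).foldl
      (fun d p => d.insert (String.ofList [p.1, p.2]) (d.getD (String.ofList [p.1, p.2]) 0 + 1))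
      PySem.Dict.empty
  let rules : PySem.Dict String Int := PySem.Dict.ofList pvRules
  -- sum(v * counts.get(k, 0) for k, v in rules.items())
  (rules.items.map (fun kv => kv.2 * counts.getD kv.1 0)).sum

-- ===== PRECONDITION & SPEC =====
def Spec_getDotEquivs (morse_string : String) (out : Int) : Prop := out = getDotEquivs_alt morse_string
instance (morse_string : String) (out : Int) : Decidable (Spec_getDotEquivs morse_string out) := by unfold Spec_getDotEquivs; infer_instance

-- ===== CLAIM (what is proved, stated in full; the proofs are below) =====
def Claim_equal_getDotEquivs : Prop := ∀ (morse_string : String), Dom_getDotEquivs morse_string → Spec_getDotEquivs morse_string (getDotEquivs morse_string)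

-- ===== LEMMAS AND PROOFS =====

-- the indexed pair comprehension is the zip of the list with its tail
theorem range_pairs_eq_zip {α : Type} (f : Char → Char → α) (d : Char) :
    ∀ (cs : List Char),
      (List.range (cs.length - 1)).map (fun k => f (cs.getD k d) (cs.getD (k + 1) d))
        = (cs.zip (cs.drop 1)).map (fun p => f p.1 p.2) := by
  intro cs
  induction cs with
  | nil => simp
  | cons a t ih =>
    cases t with
    | nil => simp
    | cons b u =>
      simp only [List.length_cons, Nat.add_sub_cancel, List.range_succ_eq_map, List.map_cons,
        List.map_map, List.drop_succ_cons, List.drop_zero, List.zip_cons_cons]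
      refine congrArg₂ _ rfl ?_
      have h := ih
      simp only [List.length_cons, Nat.add_sub_cancel, List.drop_succ_cons, List.drop_zero] at h
      rw [← h]
      apply List.map_congr_left
      intro k _
      simp [Function.comp, Nat.succ_eq_add_one]

theorem pairsA_eq_pairsB (cs : List Char) :
    (PySem.List.pyRange 0 ((cs.length : Int) - 1) 1).map
        (fun i => String.ofList [PySem.List.pyGetD cs i ' ', PySem.List.pyGetD cs (i + 1) ' '])
      = (cs.zip (cs.drop 1)).map (fun p => String.ofList [p.1, p.2]) := by
  rw [PySem.List.pyRange_one, List.map_map]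
  rw [← range_pairs_eq_zip (fun a b => String.ofList [a, b]) ' ' cs]
  have hlen : ((cs.length : Int) - 1 - 0).toNat = cs.length - 1 := by omega
  rw [hlen]
  apply List.map_congr_left
  intro k hk
  have h2 : ∀ n : Nat, ((n : Int) + 1) = (((n + 1 : Nat)) : Int) := by intro n; push_cast; ring
  simp only [Function.comp, zero_add, h2, PySem.List.pyGetD_natCast]

-- the counting loop computes the number of occurrences of each bigram
theorem counts_getD (cs : List Char) (k : String) :
    ((cs.zip (cs.drop 1)).foldl
        (fun d p => d.insert (String.ofList [p.1, p.2]) (d.getD (String.ofList [p.1, p.2]) 0 + 1))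
        PySem.Dict.empty).getD k 0
      = (((cs.zip (cs.drop 1)).map (fun p => String.ofList [p.1, p.2])).count k : Int) := by
  rw [← List.foldl_map (f := fun p : Char × Char => String.ofList [p.1, p.2])
      (g := fun d s => PySem.Dict.insert d s (PySem.Dict.getD d s 0 + 1))]
  rw [PySem.Dict.getD_foldl_insert_add_one]
  simp [PySem.Dict.getD_empty]

-- Σ over the rule table of (if key = p then value else 0) equals A's filtered lookup contribution at p
theorem rules_point (p : String) :
    ((PySem.Dict.ofList pvRules).items.map (fun kv => if kv.1 == p then kv.2 else 0)).sum
      = (if (PySem.Dict.ofList pvRules).contains p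
          then (PySem.Dict.ofList pvRules).getD p 0 else 0) := by
  by_cases h1 : p = "--"; · subst h1; decide
  by_cases h2 : p = "-."; · subst h2; decide
  by_cases h3 : p = ".."; · subst h3; decide
  by_cases h4 : p = ".-"; · subst h4; decide
  by_cases h5 : p = "- "; · subst h5; decide
  by_cases h6 : p = ". "; · subst h6; decide
  by_cases h7 : p = " /"; · subst h7; decide
  have hmk : PySem.Dict.ofList pvRules = PySem.Dict.mk pvRules := by decide
  rw [hmk]
  simp [pvRules,
    Ne.symm h1, Ne.symm h2, Ne.symm h3, Ne.symm h4, Ne.symm h5, Ne.symm h6, Ne.symm h7]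

-- filtered-lookup sum over the pairs = Σ over the rule table of value * count
theorem sum_filter_eq_sum_counts :
    ∀ (P : List String),
      ((P.filter (fun p => (PySem.Dict.ofList pvRules).contains p)).map
          (fun p => (PySem.Dict.ofList pvRules).getD p 0)).sum
        = ((PySem.Dict.ofList pvRules).items.map
            (fun kv => kv.2 * ((P.count kv.1 : Int)))).sum := by
  intro P
  induction P with
  | nil => decide
  | cons p P ih =>
    have hcount : ∀ kv : String × Int,
        kv.2 * (((p :: P).count kv.1 : Int))
          = kv.2 * ((P.count kv.1 : Int)) + (if kv.1 == p then kv.2 else 0) := by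
      intro kv
      rw [List.count_cons]
      by_cases h : kv.1 = p
      · simp [h]; ring
      · simp [h, Ne.symm h]
    have hsplit :
        ((PySem.Dict.ofList pvRules).items.map
            (fun kv => kv.2 * (((p :: P).count kv.1 : Int)))).sum
          = ((PySem.Dict.ofList pvRules).items.map
              (fun kv => kv.2 * ((P.count kv.1 : Int)))).sum
            + ((PySem.Dict.ofList pvRules).items.map
                (fun kv => if kv.1 == p then kv.2 else 0)).sum := by
      simp only [hcount]
      rw [← List.sum_map_add]
    rw [hsplit, ← ih, rules_point]
    by_cases hc : (PySem.Dict.ofList pvRules).contains p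
    · simp [hc]; ring
    · simp [hc]

-- ===== VERDICT (by name: the statement is the Claim_ definition above) =====
theorem getDotEquivs_spec : Claim_equal_getDotEquivs := by
  intro morse_string _
  unfold Spec_getDotEquivs getDotEquivs getDotEquivs_alt
  simp only [pairsA_eq_pairsB, sum_filter_eq_sum_counts, counts_getD]
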